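-- pv_equiv track=rewrite | github.com/pypi-data/pypi-mirror-359 | packages/git-wiki-builder/git_wiki_builder-0.1.4-py3-none-any.whl/git_wiki_builder/validator.py | _check_spacing
-- ===== SOURCE A (Python) =====
-- from typing import List
--
-- def _check_spacing(content: str) -> List[str]:
--     """Check spacing issues (MD009, MD010, MD012)."""
--     issues = []
--     lines = content.split("\n")
--
--     consecutive_blank_lines = 0
--
--     for i, line in enumerate(lines, 1):
--         # Check for trailing spaces (MD009)
--         # Allow 2+ spaces for line breaks
--         if line.endswith(" ") and not line.endswith("  "):
--             issues.append(f"MD009: Line {i}: Trailing spaces")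
--
--         # Check for tabs (MD010)
--         if "\t" in line:
--             issues.append(f"MD010: Line {i}: Hard tabs")
--
--         # Check for multiple consecutive blank lines (MD012)
--         if not line.strip():
--             consecutive_blank_lines += 1
--             if consecutive_blank_lines > 1:
--                 issues.append(
--                     f"MD012: Line {i}: Multiple consecutive blank lines"
--                 )
--         else:
--             consecutive_blank_lines = 0
--
--     return issues
-- ===== SOURCE B (Python) =====
-- from typing import List
--
-- def _check_spacing(content: str) -> List[str]:
--     """Check spacing issues rule by rule (MD009, MD010, MD012), then merge."""
--     lines = content.split("\n")
--     tagged = []  # (line number, rule rank, message)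
--     for i, line in enumerate(lines, 1):
--         if line.endswith(" ") and not line.endswith("  "):
--             tagged.append((i, 0, f"MD009: Line {i}: Trailing spaces"))
--     for i, line in enumerate(lines, 1):
--         if "\t" in line:
--             tagged.append((i, 1, f"MD010: Line {i}: Hard tabs"))
--     for i, (prev, cur) in enumerate(zip(lines, lines[1:]), 2):
--         if not prev.strip() and not cur.strip():
--             tagged.append((i, 2, f"MD012: Line {i}: Multiple consecutive blank lines"))
--     # one integer key: line-major, rule-minor (ranks are < 4)
--     tagged.sort(key=lambda t: t[0] * 4 + t[1])
--     return [msg for _, _, msg in tagged]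
-- ===== Notes on version B (the rewrite author's own statement) =====
-- stated objective: alternative
-- what changed: Replaces A's single stateful pass with a running blank-line counter by three independent rule passes (MD012 found by zipping each line with its successor) that tag findings with (line, rule-rank) and are merged by a sort on a line-major integer key.
import Mathlib
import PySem

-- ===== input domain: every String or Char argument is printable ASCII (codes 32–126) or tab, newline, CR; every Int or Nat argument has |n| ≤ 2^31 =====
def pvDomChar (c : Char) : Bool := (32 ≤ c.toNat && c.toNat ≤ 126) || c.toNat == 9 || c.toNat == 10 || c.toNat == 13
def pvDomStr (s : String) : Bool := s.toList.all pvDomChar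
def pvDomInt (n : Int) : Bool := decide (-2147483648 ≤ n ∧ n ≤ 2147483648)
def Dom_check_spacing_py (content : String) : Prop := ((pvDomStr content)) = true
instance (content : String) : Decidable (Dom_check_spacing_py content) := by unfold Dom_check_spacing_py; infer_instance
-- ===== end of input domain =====

-- B computes each rule's findings in its own pass (MD012 via a zip of adjacent lines) and merges
-- them with a stable sort on a line-major key, instead of A's single stateful pass (objective: alternative).

-- message builders and per-line tests shared by both ports (the exact f-strings / conditions of the Python)
def msgMD009 (i : Int) : String := "MD009: Line " ++ PySem.Int.toStr i ++ ": Trailing spaces"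
def msgMD010 (i : Int) : String := "MD010: Line " ++ PySem.Int.toStr i ++ ": Hard tabs"
def msgMD012 (i : Int) : String := "MD012: Line " ++ PySem.Int.toStr i ++ ": Multiple consecutive blank lines"
def hit009 (line : String) : Bool := PySem.Str.endswith line " " && !(PySem.Str.endswith line "  ")
def hit010 (line : String) : Bool := PySem.Str.isIn "\t" line
def isBlank (line : String) : Bool := PySem.Str.strip line == ""

-- ===== PORT A =====
-- A's loop: state = (issues, consecutive_blank_lines)
def spacingLoopA : List (Int × String) → List String → Int → List String
  | [], issues, _ => issues
  | (i, line) :: rest, issues, cbl =>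
    let issues := if hit009 line then issues ++ [msgMD009 i] else issues
    let issues := if hit010 line then issues ++ [msgMD010 i] else issues
    if PySem.Str.strip line = "" then
      let cbl := cbl + 1
      let issues := if cbl > 1 then issues ++ [msgMD012 i] else issues
      spacingLoopA rest issues cbl
    else
      spacingLoopA rest issues 0

def check_spacing_py (content : String) : List String :=
  spacingLoopA (PySem.List.enumerate ((PySem.Str.split? content "\n").getD []) 1) [] 0

-- ===== PORT B =====
-- three rule passes building (line, rank, message) triples, then a sort-merge on one integer key
def check_spacing_py_alt (content : String) : List String :=
  let lines := (PySem.Str.split? content "\n").getD []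
  let tagged : List (Int × Int × String) := []
  let tagged := (PySem.List.enumerate lines 1).foldl
      (fun acc p => if hit009 p.2 then acc ++ [(p.1, (0 : Int), msgMD009 p.1)] else acc) tagged
  let tagged := (PySem.List.enumerate lines 1).foldl
      (fun acc p => if hit010 p.2 then acc ++ [(p.1, (1 : Int), msgMD010 p.1)] else acc) tagged
  let tagged := (PySem.List.enumerate (List.zip lines (PySem.List.slice lines (some 1) none)) 2).foldl
      (fun acc p => if isBlank p.2.1 && isBlank p.2.2 then acc ++ [(p.1, (2 : Int), msgMD012 p.1)] else acc) tagged
  let tagged := PySem.List.sorted tagged (fun t => t.1 * 4 + t.2.1) false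
  tagged.map (fun t => t.2.2)

-- ===== PRECONDITION & SPEC =====
def Spec_check_spacing_py (content : String) (out : List String) : Prop := out = check_spacing_py_alt content
instance (content : String) (out : List String) : Decidable (Spec_check_spacing_py content out) := by unfold Spec_check_spacing_py; infer_instance

-- ===== CLAIM (what is proved, stated in full; the proofs are below) =====
def Claim_equal_check_spacing_py : Prop := ∀ (content : String), Dom_check_spacing_py content → Spec_check_spacing_py content (check_spacing_py content)

-- ===== LEMMAS AND PROOFS =====

-- the merged reference list: per line i, its findings in rule order, MD012 looking back at the previous line
def e009 (i : Int) (l : String) : List (Int × Int × String) := if hit009 l then [(i, 0, msgMD009 i)] else []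
def e010 (i : Int) (l : String) : List (Int × Int × String) := if hit010 l then [(i, 1, msgMD010 i)] else []
def e012 (i : Int) (p l : String) : List (Int × Int × String) := if isBlank p && isBlank l then [(i, 2, msgMD012 i)] else []

def mergedM : Int → Option String → List String → List (Int × Int × String)
  | _, _, [] => []
  | i, prev, l :: rest =>
    e009 i l ++ e010 i l ++ (match prev with | some p => e012 i p l | none => []) ++ mergedM (i + 1) (some l) rest

def tkey (t : Int × Int × String) : Int := t.1 * 4 + t.2.1

-- structural forms of B's three passes
def pass9 : Int → List String → List (Int × Int × String)
  | _, [] => []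
  | i, l :: rest => e009 i l ++ pass9 (i + 1) rest
def pass10 : Int → List String → List (Int × Int × String)
  | _, [] => []
  | i, l :: rest => e010 i l ++ pass10 (i + 1) rest
def pass12 : Int → Option String → List String → List (Int × Int × String)
  | _, _, [] => []
  | i, prev, l :: rest =>
    (match prev with | some p => e012 i p l | none => []) ++ pass12 (i + 1) (some l) rest

theorem pass9_eq (L : List String) : ∀ i : Int,
    List.map (fun p => (p.1, (0 : Int), msgMD009 p.1)) (List.filter (fun p => hit009 p.2) (PySem.List.enumerate L i)) = pass9 i L := by
  induction L with
  | nil => intro i; rfl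
  | cons l rest ih =>
    intro i
    rw [PySem.List.enumerate_cons]
    by_cases h : hit009 l
    · simp [List.filter, h, pass9, e009, ih]
    · simp [List.filter, h, pass9, e009, ih]

theorem pass10_eq (L : List String) : ∀ i : Int,
    List.map (fun p => (p.1, (1 : Int), msgMD010 p.1)) (List.filter (fun p => hit010 p.2) (PySem.List.enumerate L i)) = pass10 i L := by
  induction L with
  | nil => intro i; rfl
  | cons l rest ih =>
    intro i
    rw [PySem.List.enumerate_cons]
    by_cases h : hit010 l
    · simp [List.filter, h, pass10, e010, ih]
    · simp [List.filter, h, pass10, e010, ih]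

theorem pass12_eq (L : List String) : ∀ (p : String) (i : Int),
    List.map (fun q => (q.1, (2 : Int), msgMD012 q.1)) (List.filter (fun q => isBlank q.2.1 && isBlank q.2.2) (PySem.List.enumerate (List.zip (p :: L) L) i)) = pass12 i (some p) L := by
  induction L with
  | nil => intro p i; rfl
  | cons l rest ih =>
    intro p i
    have hz : List.zip (p :: l :: rest) (l :: rest) = (p, l) :: List.zip (l :: rest) rest := rfl
    rw [hz, PySem.List.enumerate_cons]
    by_cases h : isBlank p && isBlank l
    · simp [h, pass12, e012, ih l (i + 1)]
    · simp [h, pass12, e012, ih l (i + 1)]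

-- the merged list is a permutation of the three passes concatenated
theorem mergedM_perm (L : List String) : ∀ (i : Int) (prev : Option String),
    List.Perm (pass9 i L ++ pass10 i L ++ pass12 i prev L) (mergedM i prev L) := by
  induction L with
  | nil => intro i prev; rfl
  | cons l rest ih =>
    intro i prev
    simp only [pass9, pass10, pass12, mergedM]
    have h := ih (i + 1) (some l)
    rw [← Multiset.coe_eq_coe] at h ⊢
    simp only [← Multiset.coe_add] at h ⊢
    rw [← h]; abel

-- every key in mergedM i prev L is ≥ 4*i
theorem mergedM_key_lb (L : List String) : ∀ (i : Int) (prev : Option String) (t : Int × Int × String),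
    t ∈ mergedM i prev L → 4 * i ≤ tkey t := by
  induction L with
  | nil => intro i prev t h; simp [mergedM] at h
  | cons l rest ih =>
    intro i prev t h
    simp only [mergedM, List.mem_append] at h
    rcases h with ((h | h) | h) | h
    · simp [e009] at h; rcases h with ⟨-, h⟩; simp [h, tkey]; omega
    · simp [e010] at h; rcases h with ⟨-, h⟩; simp [h, tkey]; omega
    · cases prev with
      | none => simp at h
      | some p => simp [e012] at h; rcases h with ⟨-, h⟩; simp [h, tkey]; omega
    · have := ih (i + 1) (some l) t h; omega

theorem mergedM_pairwise (L : List String) : ∀ (i : Int) (prev : Option String),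
    List.Pairwise (fun a b => tkey a < tkey b) (mergedM i prev L) := by
  induction L with
  | nil => intro i prev; simp [mergedM]
  | cons l rest ih =>
    intro i prev
    simp only [mergedM]
    rw [List.pairwise_append, List.pairwise_append, List.pairwise_append]
    refine ⟨⟨⟨?_, ?_, ?_⟩, ?_, ?_⟩, ih (i + 1) (some l), ?_⟩
    · simp [e009]; split <;> simp
    · simp [e010]; split <;> simp
    · intro a ha b hb
      simp [e009] at ha; simp [e010] at hb
      rcases ha with ⟨-, ha⟩; rcases hb with ⟨-, hb⟩
      simp [ha, hb, tkey]
    · cases prev with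
      | none => simp
      | some p => simp [e012]; split <;> simp
    · intro a ha b hb
      cases prev with
      | none => simp at hb
      | some p =>
        simp [e012] at hb; rcases hb with ⟨-, hb⟩
        rcases List.mem_append.mp ha with ha | ha
        · simp [e009] at ha; rcases ha with ⟨-, ha⟩; simp [ha, hb, tkey]
        · simp [e010] at ha; rcases ha with ⟨-, ha⟩; simp [ha, hb, tkey]
    · intro a ha b hb
      have hb' := mergedM_key_lb rest (i + 1) (some l) b hb
      have ha' : tkey a ≤ 4 * i + 2 := by
        rcases List.mem_append.mp ha with ha | ha
        · rcases List.mem_append.mp ha with ha | ha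
          · simp [e009] at ha; rcases ha with ⟨-, ha⟩; simp [ha, tkey]; omega
          · simp [e010] at ha; rcases ha with ⟨-, ha⟩; simp [ha, tkey]; omega
        · cases prev with
          | none => simp at ha
          | some p => simp [e012] at ha; rcases ha with ⟨-, ha⟩; simp [ha, tkey]; omega
      omega

-- A's loop produces exactly the merged list's messages (invariant: the counter is ≥ 1 iff the previous line was blank)
theorem loopA_eq (L : List String) : ∀ (i : Int) (issues : List String) (cbl : Int) (prev : Option String),
    (match prev with | some p => isBlank p | none => false) = decide (1 ≤ cbl) → 0 ≤ cbl →
    spacingLoopA (PySem.List.enumerate L i) issues cbl = issues ++ (mergedM i prev L).map (fun t => t.2.2) := by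
  induction L with
  | nil => intro i issues cbl prev h1 h2; simp [mergedM, spacingLoopA, PySem.List.enumerate]
  | cons l rest ih =>
    intro i issues cbl prev h1 h2
    rw [PySem.List.enumerate_cons]
    simp only [spacingLoopA, mergedM]
    by_cases hb : PySem.Str.strip l = ""
    · rw [if_pos hb]
      have hbl : isBlank l = true := by simp [isBlank, hb]
      by_cases hp : 1 ≤ cbl
      · rw [if_pos (by omega : cbl + 1 > 1)]
        rw [ih (i + 1) _ (cbl + 1) (some l) (by simp [hbl]; omega) (by omega)]
        cases prev with
        | none => simp [hp] at h1
        | some p =>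
          have hpb : isBlank p = true := by simpa [hp] using h1
          by_cases h9 : hit009 l <;> by_cases h10 : hit010 l <;>
            simp [h9, h10, e009, e010, e012, hpb, hbl]
      · have hc : cbl = 0 := by omega
        subst hc
        rw [if_neg (by omega : ¬ ((0 : Int) + 1 > 1))]
        rw [ih (i + 1) _ (0 + 1) (some l) (by simp [hbl]) (by omega)]
        have hX : (match prev with | some p => e012 i p l | none => ([] : List (Int × Int × String))) = [] := by
          cases prev with
          | none => rfl
          | some p =>
            have hpb : isBlank p = false := by simpa using h1
            simp [e012, hpb]
        rw [hX]
        by_cases h9 : hit009 l <;> by_cases h10 : hit010 l <;>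
          simp [h9, h10, e009, e010]
    · rw [if_neg hb]
      have hbl : isBlank l = false := by simp [isBlank, hb]
      rw [ih (i + 1) _ 0 (some l) (by simp [hbl]) (by omega)]
      have hX : (match prev with | some p => e012 i p l | none => ([] : List (Int × Int × String))) = [] := by
        cases prev with
        | none => rfl
        | some p => simp [e012, hbl]
      rw [hX]
      by_cases h9 : hit009 l <;> by_cases h10 : hit010 l <;>
        simp [h9, h10, e009, e010]

-- ===== VERDICT (by name: the statement is the Claim_ definition above) =====
theorem check_spacing_py_spec : Claim_equal_check_spacing_py := by
  intro content _
  unfold Spec_check_spacing_py check_spacing_py check_spacing_py_alt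
  simp only [PySem.List.foldl_append_if, List.nil_append]
  set L := (PySem.Str.split? content "\n").getD [] with hL
  have h12 : List.map (fun q => (q.1, (2 : Int), msgMD012 q.1)) (List.filter (fun q => isBlank q.2.1 && isBlank q.2.2) (PySem.List.enumerate (List.zip L (PySem.List.slice L (some 1) none)) 2)) = pass12 1 none L := by
    rw [PySem.List.slice_from_one]
    cases L with
    | nil => rfl
    | cons l rest =>
      rw [List.tail_cons, pass12_eq rest l 2]
      norm_num [pass12]
  rw [pass9_eq L 1, pass10_eq L 1, h12]
  rw [PySem.List.sorted_eq_of_perm_of_pairwise_lt _ (mergedM 1 none L) (fun t => t.1 * 4 + t.2.1)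
        ((mergedM_perm L 1 none).symm) (by simpa [tkey] using mergedM_pairwise L 1 none)]
  exact loopA_eq L 1 [] 0 none (by simp) (by omega)
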